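-- pv_equiv track=rewrite | github.com/arin17bishwa/myCP_sols | Leetcode/3804.py | centeredSubarrays
-- ===== SOURCE A (Python) =====
-- from collections import defaultdict
-- from typing import List
--
-- def centeredSubarrays(nums: List[int]) -> int:
--     arr = nums
--     n = len(arr)
--     ans = 0
--
--     for l in range(n):
--         curr_sum = 0
--         freq = defaultdict(int)
--
--         for r in range(l, n):
--             curr_sum += arr[r]
--             freq[arr[r]] += 1
--
--             ans += freq[curr_sum] != 0
--
--     return ans
-- ===== SOURCE B (Python) =====
-- from typing import List
--
-- def centeredSubarrays(nums: List[int]) -> int: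
--     # index every value's positions once, then answer each window by a
--     # range-emptiness query on the index instead of maintaining counts
--     occ = {}
--     for i, v in enumerate(nums):
--         occ.setdefault(v, []).append(i)
--     n = len(nums)
--     ans = 0
--     for l in range(n):
--         s = 0
--         for r in range(l, n):
--             s += nums[r]
--             if any(l <= p <= r for p in occ.get(s, ())):
--                 ans += 1
--     return ans
-- ===== Notes on version B (the rewrite author's own statement) =====
-- stated objective: alternative
-- what changed: B drops A's per-window incrementally maintained defaultdict frequency table and instead builds a value-to-positions index over the whole array once, answering each window's 'does the running sum occur in the window' test as a range-emptiness query (any indexed position p with l <= p <= r) on that global index.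
import Mathlib
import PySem

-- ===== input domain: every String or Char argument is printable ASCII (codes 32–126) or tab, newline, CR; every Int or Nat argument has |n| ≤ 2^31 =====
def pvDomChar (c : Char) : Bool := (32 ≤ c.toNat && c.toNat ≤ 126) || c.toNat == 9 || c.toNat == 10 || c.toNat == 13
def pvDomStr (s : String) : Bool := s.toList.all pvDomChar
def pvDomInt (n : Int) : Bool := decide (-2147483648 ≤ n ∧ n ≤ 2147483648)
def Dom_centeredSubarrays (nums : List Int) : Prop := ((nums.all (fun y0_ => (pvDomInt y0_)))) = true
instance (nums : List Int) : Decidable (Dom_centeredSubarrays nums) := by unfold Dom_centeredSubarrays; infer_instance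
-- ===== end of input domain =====

-- B replaces A's per-window maintained frequency table by a value→positions index
-- built once; each window test becomes a range-emptiness query on that index
-- (alternative data structure, similar cost).

-- ===== PORT A =====
def centeredSubarrays (nums : List Int) : Int :=
  let n : Int := nums.length
  (PySem.List.pyRange 0 n 1).foldl (fun ans l =>
    ((PySem.List.pyRange l n 1).foldl
      (fun (st : Int × PySem.Dict Int Int × Int) r =>
        let x := PySem.List.pyGetD nums r 0
        let cs := st.1 + x
        let freq := st.2.1.modify x 0 (· + 1)
        (cs, freq, st.2.2 + (if freq.getD cs 0 ≠ 0 then 1 else 0)))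
      (0, PySem.Dict.empty, ans)).2.2) 0

-- ===== PORT B =====
-- occ = {}; for i, v in enumerate(nums): occ.setdefault(v, []).append(i)
def pvOcc (nums : List Int) : PySem.Dict Int (List Int) :=
  (PySem.List.enumerate nums).foldl
    (fun d p => d.modify p.2 [] (· ++ [p.1])) PySem.Dict.empty

def centeredSubarrays_alt (nums : List Int) : Int :=
  let occ := pvOcc nums
  let n : Int := nums.length
  (PySem.List.pyRange 0 n 1).foldl (fun ans l =>
    ((PySem.List.pyRange l n 1).foldl
      (fun (st : Int × Int) r =>
        let s := st.1 + PySem.List.pyGetD nums r 0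
        -- any(l <= p <= r for p in occ.get(s, ()))
        (s, st.2 + (if ∃ p ∈ occ.getD s [], l ≤ p ∧ p ≤ r then 1 else 0)))
      (0, ans)).2) 0

-- ===== PRECONDITION & SPEC =====
def Spec_centeredSubarrays (nums : List Int) (out : Int) : Prop := out = centeredSubarrays_alt nums
instance (nums : List Int) (out : Int) : Decidable (Spec_centeredSubarrays nums out) := by unfold Spec_centeredSubarrays; infer_instance

-- ===== CLAIM (what is proved, stated in full; the proofs are below) =====
def Claim_equal_centeredSubarrays : Prop := ∀ (nums : List Int), Dom_centeredSubarrays nums → Spec_centeredSubarrays nums (centeredSubarrays nums)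

-- ===== LEMMAS AND PROOFS =====

-- the index lists exactly the positions of each value
theorem pv_occ_getD (nums : List Int) (v : Int) :
    (pvOcc nums).getD v []
      = ((PySem.List.enumerate nums).filter (fun p => p.2 == v)).map (·.1) := by
  have h := PySem.Dict.getD_foldl_modify_append
    ((PySem.List.enumerate nums).map (fun p => (p.2, p.1))) PySem.Dict.empty v
  rw [List.foldl_map] at h
  unfold pvOcc
  rw [h, List.filter_map, List.map_map]
  simp [Function.comp_def]

theorem pv_mem_occ (nums : List Int) (v p : Int) :
    p ∈ (pvOcc nums).getD v []
      ↔ ∃ (k : Nat) (h : k < nums.length), p = (k : Int) ∧ nums[k] = v := by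
  rw [pv_occ_getD]
  simp only [List.mem_map, List.mem_filter, PySem.List.mem_enumerate_iff]
  constructor
  · rintro ⟨q, ⟨⟨k, hk, rfl⟩, hv⟩, rfl⟩
    exact ⟨k, hk, by simp, by simpa using hv⟩
  · rintro ⟨k, hk, rfl, rfl⟩
    exact ⟨((0 : Int) + k, nums[k]), ⟨⟨k, hk, rfl⟩, by simp⟩, by simp⟩

theorem pv_mem_slice (nums : List Int) (l r v : Int) (h0 : 0 ≤ l) (hlr : l ≤ r)
    (hr : r < (nums.length : Int)) :
    v ∈ PySem.List.slice nums (some l) (some (r + 1))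
      ↔ ∃ (k : Nat) (h : k < nums.length), l ≤ (k : Int) ∧ (k : Int) ≤ r ∧ nums[k] = v := by
  rw [PySem.List.slice_toNat _ h0 (by omega), List.mem_iff_getElem]
  constructor
  · rintro ⟨j, hj, hget⟩
    have hj' : j < min ((r+1).toNat - l.toNat) (nums.length - l.toNat) := by
      rw [List.length_take, List.length_drop] at hj; exact hj
    rw [List.getElem_take, List.getElem_drop] at hget
    refine ⟨l.toNat + j, by omega, by omega, by omega, hget⟩
  · rintro ⟨k, hk, hlk, hkr, hget⟩
    have hj : k - l.toNat < (List.take ((r+1).toNat - l.toNat) (nums.drop l.toNat)).length := by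
      rw [List.length_take, List.length_drop]; omega
    refine ⟨k - l.toNat, hj, ?_⟩
    rw [List.getElem_take, List.getElem_drop]
    have : l.toNat + (k - l.toNat) = k := by omega
    simp [this, hget]

-- A's defaultdict test equals a membership test on the window
theorem pv_test (w : List Int) (v : Int) :
    (if (PySem.Dict.counter w).getD v 0 ≠ 0 then (1 : Int) else 0)
      = (if v ∈ w then (1 : Int) else 0) := by
  rw [PySem.Dict.getD_counter]
  by_cases hmem : v ∈ w
  · rw [if_pos hmem, if_pos]
    have := List.count_pos_iff.mpr hmem
    simp only [ne_eq, Int.natCast_eq_zero]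
    omega
  · rw [if_neg hmem, if_neg]
    simp [List.count_eq_zero.mpr hmem]

-- B's range-emptiness query on the index equals A's window test
theorem pv_test2 (nums : List Int) (l r v : Int) (h0 : 0 ≤ l) (hlr : l ≤ r)
    (hr : r < (nums.length : Int)) :
    (if ∃ p ∈ (pvOcc nums).getD v [], l ≤ p ∧ p ≤ r then (1 : Int) else 0)
      = (if (PySem.Dict.counter (PySem.List.slice nums (some l) (some (r + 1)))).getD v 0 ≠ 0
          then (1 : Int) else 0) := by
  rw [pv_test]
  have hiff : (∃ p ∈ (pvOcc nums).getD v [], l ≤ p ∧ p ≤ r)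
      ↔ v ∈ PySem.List.slice nums (some l) (some (r + 1)) := by
    rw [pv_mem_slice nums l r v h0 hlr hr]
    constructor
    · rintro ⟨p, hp, hlp, hpr⟩
      obtain ⟨k, hk, rfl, hget⟩ := (pv_mem_occ nums v p).mp hp
      exact ⟨k, hk, hlp, hpr, hget⟩
    · rintro ⟨k, hk, hlk, hkr, hget⟩
      exact ⟨(k : Int), (pv_mem_occ nums v _).mpr ⟨k, hk, rfl, hget⟩, hlk, hkr⟩
  rw [if_congr hiff rfl rfl]

-- extending the slice window by one element on the right
theorem pv_slice_succ (nums : List Int) (l r : Int) (h0 : 0 ≤ l) (hlr : l ≤ r)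
    (hr : r < (nums.length : Int)) :
    PySem.List.slice nums (some l) (some (r + 1))
      = PySem.List.slice nums (some l) (some r) ++ [PySem.List.pyGetD nums r 0] := by
  rw [PySem.List.slice_toNat _ h0 (by omega), PySem.List.slice_toNat _ h0 (by omega)]
  have h2 : (r + 1).toNat - l.toNat = (r.toNat - l.toNat) + 1 := by omega
  rw [h2, List.take_add_one]
  congr 1
  have hget : (nums.drop l.toNat)[r.toNat - l.toNat]? = some (PySem.List.pyGetD nums r 0) := by
    rw [PySem.List.pyGetD_eq_getElem nums 0 (by omega) hr]
    rw [List.getElem?_drop]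
    have hidx : l.toNat + (r.toNat - l.toNat) = r.toNat := by omega
    rw [hidx, List.getElem?_eq_getElem (by omega)]
  simp [hget]

-- inner loop: A's state vs B's state, related by the processed window w
theorem pv_inner (nums : List Int) (l : Int) (h0 : 0 ≤ l) :
    ∀ (k : Nat) (r : Int), l ≤ r → ((nums.length : Int) - r).toNat = k →
    ∀ (w : List Int), w = PySem.List.slice nums (some l) (some r) →
    ∀ (ans : Int),
    ((PySem.List.pyRange r (nums.length : Int) 1).foldl
      (fun (st : Int × PySem.Dict Int Int × Int) r =>
        let x := PySem.List.pyGetD nums r 0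
        let cs := st.1 + x
        let freq := st.2.1.modify x 0 (· + 1)
        (cs, freq, st.2.2 + (if freq.getD cs 0 ≠ 0 then 1 else 0)))
      (w.sum, PySem.Dict.counter w, ans)).2.2
    = ((PySem.List.pyRange r (nums.length : Int) 1).foldl
      (fun (st : Int × Int) r =>
        let s := st.1 + PySem.List.pyGetD nums r 0
        (s, st.2 + (if ∃ p ∈ (pvOcc nums).getD s [], l ≤ p ∧ p ≤ r then 1 else 0)))
      (w.sum, ans)).2 := by
  intro k
  induction k with
  | zero =>
    intro r hlr hk w hw ans
    rw [PySem.List.pyRange_one_eq_nil (by omega)]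
    rfl
  | succ k ih =>
    intro r hlr hk w hw ans
    have hr : r < (nums.length : Int) := by omega
    rw [PySem.List.pyRange_one_cons hr]
    simp only [List.foldl_cons]
    have hcounter : ((PySem.Dict.counter w).modify (PySem.List.pyGetD nums r 0) 0 (· + 1))
        = PySem.Dict.counter (w ++ [PySem.List.pyGetD nums r 0]) := by
      rw [PySem.Dict.counter_append_singleton]
    have hsum : w.sum + PySem.List.pyGetD nums r 0
        = (w ++ [PySem.List.pyGetD nums r 0]).sum := by simp
    have hslice : PySem.List.slice nums (some l) (some (r + 1))
        = w ++ [PySem.List.pyGetD nums r 0] := by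
      rw [pv_slice_succ nums l r h0 hlr hr, hw]
    rw [hcounter, hsum, pv_test2 nums l r _ h0 hlr hr, hslice]
    exact ih (r + 1) (by omega) (by omega) _ hslice.symm _

theorem pv_outer_step (nums : List Int) (l : Int) (h0 : 0 ≤ l) (ans : Int) :
    ((PySem.List.pyRange l (nums.length : Int) 1).foldl
      (fun (st : Int × PySem.Dict Int Int × Int) r =>
        let x := PySem.List.pyGetD nums r 0
        let cs := st.1 + x
        let freq := st.2.1.modify x 0 (· + 1)
        (cs, freq, st.2.2 + (if freq.getD cs 0 ≠ 0 then 1 else 0)))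
      (0, PySem.Dict.empty, ans)).2.2
    = ((PySem.List.pyRange l (nums.length : Int) 1).foldl
      (fun (st : Int × Int) r =>
        let s := st.1 + PySem.List.pyGetD nums r 0
        (s, st.2 + (if ∃ p ∈ (pvOcc nums).getD s [], l ≤ p ∧ p ≤ r then 1 else 0)))
      (0, ans)).2 := by
  have hnil : PySem.List.slice nums (some l) (some l) = ([] : List Int) := by
    rw [PySem.List.slice_toNat _ h0 h0]
    simp
  have := pv_inner nums l h0 ((nums.length : Int) - l).toNat l le_rfl rfl [] hnil.symm ans
  simpa using this

-- ===== VERDICT (by name: the statement is the Claim_ definition above) =====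
theorem centeredSubarrays_spec : Claim_equal_centeredSubarrays := by
  intro nums _
  unfold Spec_centeredSubarrays centeredSubarrays centeredSubarrays_alt
  apply PySem.List.foldl_congr_mem
  intro ans l hl
  have h0 : 0 ≤ l := ((PySem.List.mem_pyRange_one).mp hl).1
  exact pv_outer_step nums l h0 ans
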